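-- pv_equiv track=rewrite | github.com/zeqing-j/ORF_Analysis_5-_Mammalian_Genome | conservation_utr.py | relaxed_match_with_indels
-- ===== SOURCE A (Python) =====
-- def relaxed_match_with_indels(species_sequence, orf_seq, start_codon="atg", stop_codons={"tag", "taa", "tga"}):
--     """Check for relaxed matching allowing indels but no substitutions, keeping start and stop codons intact."""
--     # Check start codon
--     if not species_sequence.startswith(start_codon) or species_sequence[-3:] not in stop_codons:
--         return False
--
--     # Allow for indels in multiples of 3 but no substitutions
--     indel_tolerance = 3
--     i, j, indels = 0, 0, 0
--     while i < len(orf_seq) and j < len(species_sequence):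
--         if orf_seq[i] == species_sequence[j]:
--             i += 1
--             j += 1
--         else:
--             # Try an indel of 3 nucleotides
--             indels += 1
--             if indels > indel_tolerance // 3:
--                 return False
--             j += 3
--     return i == len(orf_seq)
-- ===== SOURCE B (Python) =====
-- def relaxed_match_with_indels(species_sequence, orf_seq, start_codon="atg", stop_codons={"tag", "taa", "tga"}):
--     """Check for relaxed matching allowing indels but no substitutions, keeping start and stop codons intact."""
--     if not species_sequence.startswith(start_codon) or species_sequence[-3:] not in stop_codons:
--         return False
--     # find the common-prefix length
--     p = 0
--     while p < len(orf_seq) and p < len(species_sequence) and orf_seq[p] == species_sequence[p]: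
--         p += 1
--     if p == len(orf_seq):
--         return True
--     # one 3-nt skip in the species sequence, then the tail must match exactly
--     return orf_seq[p:] == species_sequence[p + 3 : p + 3 + (len(orf_seq) - p)]
-- ===== Notes on version B (the rewrite author's own statement) =====
-- stated objective: simpler
-- what changed: Replaces A's single stateful two-pointer loop with indel counting by a plain common-prefix scan followed by one direct slice comparison of the tail against the species sequence shifted by 3.
import Mathlib
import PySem

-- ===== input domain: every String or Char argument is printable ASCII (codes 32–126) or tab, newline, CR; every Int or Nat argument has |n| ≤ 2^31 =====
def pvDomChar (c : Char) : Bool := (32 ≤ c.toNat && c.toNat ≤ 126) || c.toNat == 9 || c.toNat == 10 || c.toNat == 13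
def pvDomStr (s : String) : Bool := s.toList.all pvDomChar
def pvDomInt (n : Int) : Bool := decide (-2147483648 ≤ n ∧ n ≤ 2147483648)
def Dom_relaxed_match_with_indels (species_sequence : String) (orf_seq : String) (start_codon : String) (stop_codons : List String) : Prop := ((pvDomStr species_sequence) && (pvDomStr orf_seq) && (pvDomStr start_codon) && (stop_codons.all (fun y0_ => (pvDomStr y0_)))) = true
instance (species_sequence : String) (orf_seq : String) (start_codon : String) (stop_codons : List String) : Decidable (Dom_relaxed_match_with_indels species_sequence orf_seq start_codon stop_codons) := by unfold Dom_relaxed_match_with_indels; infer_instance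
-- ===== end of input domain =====

-- B replaces A's stateful two-pointer/indel-counter loop with a common-prefix scan plus one
-- aligned tail slice comparison (objective: simpler). Return value only; no mutation in either.

-- ===== PORT A =====
-- A's while loop: i, j, indels as in the Python (indices are always in range when read,
-- so List.getD is exact at those reads; the default is never used).
def pvLoopA (orf sp : List Char) (i j indels : Nat) : Bool :=
  if i < orf.length ∧ j < sp.length then
    if orf.getD i ' ' == sp.getD j ' ' then
      pvLoopA orf sp (i + 1) (j + 1) indels
    else
      -- indels += 1; if indels > indel_tolerance // 3: return False; j += 3
      if indels + 1 > 3 / 3 then false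
      else pvLoopA orf sp i (j + 3) (indels + 1)
  else decide (i = orf.length)
termination_by (orf.length - i) + (sp.length - j)
decreasing_by all_goals omega

def relaxed_match_with_indels (species_sequence : String) (orf_seq : String) (start_codon : String) (stop_codons : List String) : Bool :=
  if !(PySem.Str.startswith species_sequence start_codon)
     || !(stop_codons.contains (PySem.Str.slice species_sequence (some (-3)) none)) then
    false
  else
    pvLoopA orf_seq.toList species_sequence.toList 0 0 0

-- ===== PORT B =====
-- B's prefix scan: while p < len(orf) and p < len(species) and orf[p] == species[p]: p += 1
def pvPrefixLen (orf sp : List Char) (p : Nat) : Nat :=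
  if p < orf.length ∧ p < sp.length ∧ orf.getD p ' ' == sp.getD p ' ' then
    pvPrefixLen orf sp (p + 1)
  else p
termination_by orf.length - p
decreasing_by omega

def relaxed_match_with_indels_alt (species_sequence : String) (orf_seq : String) (start_codon : String) (stop_codons : List String) : Bool :=
  if !(PySem.Str.startswith species_sequence start_codon)
     || !(stop_codons.contains (PySem.Str.slice species_sequence (some (-3)) none)) then
    false
  else
    if pvPrefixLen orf_seq.toList species_sequence.toList 0 = orf_seq.toList.length then true
    else
      -- orf_seq[p:] == species_sequence[p+3 : p+3+(len(orf_seq)-p)]  with p the prefix length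
      PySem.List.slice orf_seq.toList
          (some (pvPrefixLen orf_seq.toList species_sequence.toList 0 : Int)) none
        == PySem.List.slice species_sequence.toList
          (some ((pvPrefixLen orf_seq.toList species_sequence.toList 0 : Int) + 3))
          (some ((pvPrefixLen orf_seq.toList species_sequence.toList 0 : Int) + 3
                 + ((orf_seq.toList.length - pvPrefixLen orf_seq.toList species_sequence.toList 0 : Nat) : Int)))

-- ===== PRECONDITION & SPEC =====
def Spec_relaxed_match_with_indels (species_sequence : String) (orf_seq : String) (start_codon : String) (stop_codons : List String) (out : Bool) : Prop := out = relaxed_match_with_indels_alt species_sequence orf_seq start_codon stop_codons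
instance (species_sequence : String) (orf_seq : String) (start_codon : String) (stop_codons : List String) (out : Bool) : Decidable (Spec_relaxed_match_with_indels species_sequence orf_seq start_codon stop_codons out) := by unfold Spec_relaxed_match_with_indels; infer_instance

-- ===== CLAIM (what is proved, stated in full; the proofs are below) =====
def Claim_equal_relaxed_match_with_indels : Prop := ∀ (species_sequence : String) (orf_seq : String) (start_codon : String) (stop_codons : List String), Dom_relaxed_match_with_indels species_sequence orf_seq start_codon stop_codons → Spec_relaxed_match_with_indels species_sequence orf_seq start_codon stop_codons (relaxed_match_with_indels species_sequence orf_seq start_codon stop_codons)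

-- ===== LEMMAS AND PROOFS =====

-- Phase after the single allowed skip: A's loop with indels = 1 and j = i + 3 is exactly
-- "the rest of orf equals the aligned window of sp".
theorem pvLoopA_phase1 (orf sp : List Char) (i : Nat) (hi : i ≤ orf.length) :
    pvLoopA orf sp i (i + 3) 1
      = (orf.drop i == (sp.drop (i + 3)).take (orf.length - i)) := by
  generalize hn : orf.length - i = n
  induction n generalizing i with
  | zero =>
    have hie : i = orf.length := by omega
    rw [pvLoopA]
    simp [hie]
  | succ n ih =>
    have hi' : i < orf.length := by omega
    rw [pvLoopA]
    by_cases hj : i + 3 < sp.length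
    · simp only [hi', hj, and_true, if_pos trivial]
      rw [List.getD_eq_getElem orf ' ' hi', List.getD_eq_getElem sp ' ' hj]
      rw [List.drop_eq_getElem_cons hi', List.drop_eq_getElem_cons hj,
          List.take_succ_cons, List.cons_beq_cons]
      by_cases hc : orf[i] = sp[i + 3]
      · simp only [hc, beq_self_eq_true, if_pos]
        rw [show i + 3 + 1 = (i + 1) + 3 by omega]
        rw [ih (i + 1) (by omega) (by omega)]
        simp
      · simp only [beq_iff_eq, hc, if_neg, not_false_iff]
        simp only [if_pos (by omega : 1 + 1 > 3 / 3)]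
        simp [hc]
    · rw [if_neg (by omega : ¬ (i < orf.length ∧ i + 3 < sp.length))]
      have hd : sp.drop (i + 3) = [] := by rw [List.drop_eq_nil_iff]; omega
      rw [hd, List.take_nil]
      have ho : orf.drop i ≠ [] := by simp [List.drop_eq_nil_iff]; omega
      rw [show (decide (i = orf.length)) = false by simp; omega]
      cases hh : orf.drop i == ([] : List Char)
      · rfl
      · exact absurd (by simpa using hh) ho

-- Phase before any skip: A's loop with indels = 0 and i = j, computed via B's prefix length.
theorem pvLoopA_phase0 (orf sp : List Char) (p : Nat)
    (hpo : p ≤ orf.length) (hps : p ≤ sp.length) :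
    pvLoopA orf sp p p 0
      = (if pvPrefixLen orf sp p = orf.length then true
         else (orf.drop (pvPrefixLen orf sp p)
            == (sp.drop (pvPrefixLen orf sp p + 3)).take (orf.length - pvPrefixLen orf sp p))) := by
  generalize hn : orf.length - p = n
  induction n generalizing p with
  | zero =>
    have hpe : p = orf.length := by omega
    have hpp : pvPrefixLen orf sp p = p := by
      rw [pvPrefixLen]; exact if_neg (fun h => absurd hpe (by omega : ¬ p = orf.length))
    rw [pvLoopA, if_neg (by omega : ¬ (p < orf.length ∧ p < sp.length)), hpp, if_pos hpe]
    simp [hpe]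
  | succ n ih =>
    have hp' : p < orf.length := by omega
    by_cases hj : p < sp.length
    · by_cases hc : (orf.getD p ' ' == sp.getD p ' ') = true
      · have hpp : pvPrefixLen orf sp p = pvPrefixLen orf sp (p + 1) := by
          rw [pvPrefixLen]; exact if_pos ⟨hp', hj, hc⟩
        rw [hpp, pvLoopA, if_pos ⟨hp', hj⟩, if_pos hc]
        exact ih (p + 1) (by omega) (by omega) (by omega)
      · have hpp : pvPrefixLen orf sp p = p := by
          rw [pvPrefixLen]; exact if_neg (fun h => hc h.2.2)
        rw [hpp, pvLoopA, if_pos ⟨hp', hj⟩, if_neg (by exact fun h => hc h),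
            if_neg (by decide : ¬ (0 + 1 > 3 / 3))]
        rw [if_neg (by omega : ¬ p = orf.length)]
        exact pvLoopA_phase1 orf sp p (by omega)
    · have hpp : pvPrefixLen orf sp p = p := by
        rw [pvPrefixLen]; exact if_neg (fun h => hj h.2.1)
      rw [hpp, pvLoopA, if_neg (by omega : ¬ (p < orf.length ∧ p < sp.length)),
          if_neg (by omega : ¬ p = orf.length),
          show (decide (p = orf.length)) = false by simp; omega]
      have hd : sp.drop (p + 3) = [] := by rw [List.drop_eq_nil_iff]; omega
      have ho : orf.drop p ≠ [] := by simp only [ne_eq, List.drop_eq_nil_iff]; omega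
      rw [hd, List.take_nil]
      cases hh : orf.drop p == ([] : List Char)
      · rfl
      · exact absurd (by simpa using hh) ho

-- ===== VERDICT (by name: the statement is the Claim_ definition above) =====
theorem relaxed_match_with_indels_spec : Claim_equal_relaxed_match_with_indels := by
  intro species orf_seq start_codon stop_codons _
  unfold Spec_relaxed_match_with_indels relaxed_match_with_indels relaxed_match_with_indels_alt
  by_cases hg : (!(PySem.Str.startswith species start_codon)
      || !(stop_codons.contains (PySem.Str.slice species (some (-3)) none))) = true
  · rw [if_pos hg, if_pos hg]
  · rw [if_neg hg, if_neg hg]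
    rw [pvLoopA_phase0 orf_seq.toList species.toList 0 (Nat.zero_le _) (Nat.zero_le _)]
    rw [PySem.List.slice_from_natCast]
    rw [show ((pvPrefixLen orf_seq.toList species.toList 0 : Int) + 3)
          = ((pvPrefixLen orf_seq.toList species.toList 0 + 3 : Nat) : Int) by push_cast; ring]
    rw [PySem.List.slice_natCast_add]
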